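-- pv_equiv track=rewrite | github.com/adammsafi/ta_lab2 | src/ta_lab2/scripts/bars/refresh_tvc_price_bars_1d.py | _normalize_db_url
-- ===== SOURCE A (Python) =====
-- def _normalize_db_url(url: str) -> str:
--     """Remove SQLAlchemy dialect prefix for psycopg connection."""
--     if not url:
--         return url
--     for prefix in (
--         "postgresql+psycopg2://",
--         "postgresql+psycopg://",
--         "postgresql+psycopg3://",
--         "postgres+psycopg2://",
--         "postgres+psycopg://",
--         "postgres+psycopg3://",
--     ):
--         if url.startswith(prefix):
--             return "postgresql://" + url[len(prefix) :]
--     return url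
-- ===== SOURCE B (Python) =====
-- _DIALECTS = frozenset({
--     "postgresql+psycopg2", "postgresql+psycopg", "postgresql+psycopg3",
--     "postgres+psycopg2", "postgres+psycopg", "postgres+psycopg3",
-- })
--
-- def _normalize_db_url(url: str) -> str:
--     """Remove SQLAlchemy dialect prefix for psycopg connection."""
--     if not url:
--         return url
--     parts = url.split("://", 1)
--     if len(parts) == 2 and parts[0] in _DIALECTS:
--         return "postgresql://" + parts[1]
--     return url
-- ===== Notes on version B (the rewrite author's own statement) =====
-- stated objective: idiomatic
-- what changed: Replaces the six-way startswith loop by a single split at the first scheme separator followed by one frozenset membership test of the scheme name.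
import Mathlib
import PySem

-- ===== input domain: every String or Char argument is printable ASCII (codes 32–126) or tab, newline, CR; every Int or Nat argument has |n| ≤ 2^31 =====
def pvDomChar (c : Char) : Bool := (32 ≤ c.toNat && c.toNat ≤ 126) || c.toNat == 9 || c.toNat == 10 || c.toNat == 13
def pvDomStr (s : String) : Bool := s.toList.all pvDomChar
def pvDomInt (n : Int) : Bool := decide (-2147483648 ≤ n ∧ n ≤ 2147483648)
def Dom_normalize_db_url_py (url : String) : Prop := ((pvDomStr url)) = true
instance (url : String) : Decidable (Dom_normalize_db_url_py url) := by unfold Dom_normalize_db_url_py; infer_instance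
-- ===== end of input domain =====

-- B replaces A's six-way startswith loop by one split at the first "://" plus a set-membership test of the scheme (idiomatic; same cost).


-- ===== PORT A =====
-- the tuple of prefixes A iterates over, in order
def pvPrefixes : List String :=
  ["postgresql+psycopg2://", "postgresql+psycopg://", "postgresql+psycopg3://",
   "postgres+psycopg2://", "postgres+psycopg://", "postgres+psycopg3://"]

-- the 'for prefix in (…): if url.startswith(prefix): return …' loop
def pvStripLoop (url : String) : List String → String
  | [] => url
  | p :: ps =>
    if PySem.Chars.startswith url.toList p.toList then
      String.ofList ("postgresql://".toList ++ PySem.List.slice url.toList (some (p.toList.length : Int)) none)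
    else pvStripLoop url ps

def normalize_db_url_py (url : String) : String :=
  if url.toList = [] then url else pvStripLoop url pvPrefixes

-- ===== PORT B =====
-- the frozenset _DIALECTS (distinct scheme names)
def pvDialects : List (List Char) :=
  ["postgresql+psycopg2".toList, "postgresql+psycopg".toList, "postgresql+psycopg3".toList,
   "postgres+psycopg2".toList, "postgres+psycopg".toList, "postgres+psycopg3".toList]

def normalize_db_url_py_alt (url : String) : String :=
  if url.toList = [] then url
  else
    match PySem.Chars.splitOnMax url.toList "://".toList 1 with
    | [scheme, rest] =>
        if scheme ∈ pvDialects then String.ofList ("postgresql://".toList ++ rest) else url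
    | _ => url

-- ===== PRECONDITION & SPEC =====
def Spec_normalize_db_url_py (url : String) (out : String) : Prop := out = normalize_db_url_py_alt url
instance (url : String) (out : String) : Decidable (Spec_normalize_db_url_py url out) := by unfold Spec_normalize_db_url_py; infer_instance

-- ===== CLAIM (what is proved, stated in full; the proofs are below) =====
def Claim_equal_normalize_db_url_py : Prop := ∀ (url : String), Dom_normalize_db_url_py url → Spec_normalize_db_url_py url (normalize_db_url_py url)

-- ===== LEMMAS AND PROOFS =====

-- once maxsplit is exhausted, the scanner flushes the rest in one piece
lemma go_zero (sep : List Char) (fuel : Nat) (l cur : List Char) (acc : List (List Char)) :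
    PySem.Chars.splitOnMax.go sep fuel 0 l cur acc = ((cur.reverse ++ l) :: acc).reverse := by
  cases fuel with
  | zero => simp [PySem.Chars.splitOnMax.go]
  | succ n => cases l <;> simp [PySem.Chars.splitOnMax.go]

-- with maxsplit 1 the scanner either finds no separator or splits the input as a ++ sep ++ b
lemma go_one (sep : List Char) : ∀ (fuel : Nat) (l cur : List Char),
    PySem.Chars.splitOnMax.go sep fuel 1 l cur [] = [cur.reverse ++ l] ∨
    ∃ a b, l = a ++ sep ++ b ∧ PySem.Chars.splitOnMax.go sep fuel 1 l cur [] = [cur.reverse ++ a, b] := by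
  intro fuel
  induction fuel with
  | zero => intro l cur; left; simp [PySem.Chars.splitOnMax.go]
  | succ n ih =>
    intro l cur
    cases l with
    | nil => left; simp [PySem.Chars.splitOnMax.go]
    | cons c rest =>
      by_cases hp : sep.isPrefixOf (c :: rest) = true
      · right
        obtain ⟨t, ht⟩ := List.isPrefixOf_iff_prefix.mp hp
        refine ⟨[], t, by simpa using ht.symm, ?_⟩
        simp only [PySem.Chars.splitOnMax.go, hp, if_true]
        rw [← ht]
        have hd : List.drop sep.length (sep ++ t) = t := List.drop_left
        rw [hd, go_zero]
        simp
      · rcases ih rest (c :: cur) with h | ⟨a, b, hab, h⟩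
        · left
          simp only [PySem.Chars.splitOnMax.go, hp]
          rw [h]; simp
        · right
          refine ⟨c :: a, b, by simp [hab], ?_⟩
          simp only [PySem.Chars.splitOnMax.go, hp]
          rw [h]; simp

lemma splitOnMax_cases (sep l : List Char) :
    PySem.Chars.splitOnMax l sep 1 = [l] ∨
    ∃ a b, l = a ++ sep ++ b ∧ PySem.Chars.splitOnMax l sep 1 = [a, b] := by
  unfold PySem.Chars.splitOnMax
  have h := go_one sep (l.length + 1) l []
  simpa using h

-- a list without ':' never has ':'-headed sep starting inside it
lemma noColonPrefix (t : List Char) : ∀ (a : List Char), ':' ∉ a → ∀ (z : List Char) (i : Nat),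
    i < a.length → (':' :: t).isPrefixOf (a.drop i ++ z) = false := by
  intro a
  induction a with
  | nil => intro _ z i hi; simp at hi
  | cons c a' ih =>
    intro h z i hi
    cases i with
    | zero =>
      simp only [List.drop_zero, List.cons_append, List.isPrefixOf]
      have hc : c ≠ ':' := fun hc => h (by simp [hc])
      simp [beq_iff_eq, Ne.symm hc]
    | succ j =>
      simp only [List.drop_succ_cons]
      exact ih (fun hm => h (List.mem_cons_of_mem _ hm)) z j (by simpa using hi)

-- scanning a ++ sep ++ b where sep starts nowhere inside a splits exactly at a
lemma go_found (s : Char) (ss : List Char) :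
    ∀ (a : List Char) (fuel : Nat) (b cur : List Char),
    (∀ i, i < a.length → (s :: ss).isPrefixOf (a.drop i ++ (s :: ss) ++ b) = false) →
    (a ++ (s :: ss) ++ b).length < fuel →
    PySem.Chars.splitOnMax.go (s :: ss) fuel 1 (a ++ (s :: ss) ++ b) cur [] = [cur.reverse ++ a, b] := by
  intro a
  induction a with
  | nil =>
    intro fuel b cur _ hfuel
    cases fuel with
    | zero => simp at hfuel
    | succ n =>
      have hp : (s :: ss).isPrefixOf ((s :: ss) ++ b) = true := by
        simp [List.isPrefixOf_iff_prefix, List.prefix_append]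
      have hd : List.drop (s :: ss).length ((s :: ss) ++ b) = b := List.drop_left
      simp only [List.cons_append] at hp hd
      simp only [List.nil_append, List.cons_append, PySem.Chars.splitOnMax.go, hp, if_true]
      rw [hd, go_zero]
      simp
  | cons c a' ih =>
    intro fuel b cur h hfuel
    cases fuel with
    | zero => simp at hfuel
    | succ n =>
      have hp : (s :: ss).isPrefixOf ((c :: a') ++ (s :: ss) ++ b) = false := by
        have := h 0 (by simp)
        simpa using this
      simp only [List.cons_append] at hp ⊢
      simp only [PySem.Chars.splitOnMax.go, hp]
      have h' : ∀ i, i < a'.length → (s :: ss).isPrefixOf (a'.drop i ++ (s :: ss) ++ b) = false := by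
        intro i hi
        have := h (i + 1) (by simp; omega)
        simpa using this
      have hf : (a' ++ (s :: ss) ++ b).length < n := by
        simp at hfuel ⊢; omega
      have := ih n b (c :: cur) h' hf
      rw [this]; simp

lemma splitOnMax_found (scheme b : List Char) (hs : ':' ∉ scheme) :
    PySem.Chars.splitOnMax (scheme ++ "://".toList ++ b) "://".toList 1 = [scheme, b] := by
  have e : (':' :: "//".toList) = "://".toList := by decide
  unfold PySem.Chars.splitOnMax
  have h := go_found ':' ("//".toList) scheme
      ((scheme ++ (':' :: "//".toList) ++ b).length + 1) b []
      (fun i hi => by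
        have h2 := noColonPrefix ("//".toList) scheme hs ((':' :: "//".toList) ++ b) i hi
        simpa [List.append_assoc] using h2)
      (by omega)
  rw [e] at h
  simpa using h

lemma alt_pos (url : String) (scheme rest : List Char) (hs : ':' ∉ scheme)
    (hmem : scheme ∈ pvDialects) (hu : url.toList = scheme ++ "://".toList ++ rest) :
    normalize_db_url_py_alt url = String.ofList ("postgresql://".toList ++ rest) := by
  have hne : url.toList ≠ [] := by rw [hu]; simp
  unfold normalize_db_url_py_alt
  rw [if_neg hne, hu, splitOnMax_found scheme rest hs]
  simp [hmem]

lemma alt_neg (url : String)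
    (h : ∀ s ∈ pvDialects, PySem.Chars.startswith url.toList (s ++ "://".toList) = false) :
    normalize_db_url_py_alt url = url := by
  unfold normalize_db_url_py_alt
  by_cases h0 : url.toList = []
  · simp [h0]
  · rw [if_neg h0]
    rcases splitOnMax_cases "://".toList url.toList with hc | ⟨a, b, hab, hc⟩
    · rw [hc]
    · rw [hc]
      by_cases hm : a ∈ pvDialects
      · exfalso
        have hsw : PySem.Chars.startswith url.toList (a ++ "://".toList) = true := by
          rw [PySem.Chars.startswith_iff]
          exact ⟨b, by rw [hab, List.append_assoc]⟩
        rw [h a hm] at hsw; exact Bool.false_ne_true hsw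
      · simp [hm]

-- the positive branch, shared by the six prefixes
lemma pos_branch (url p scheme : String) (hsplit : p.toList = scheme.toList ++ "://".toList)
    (hs : ':' ∉ scheme.toList) (hmem : scheme.toList ∈ pvDialects)
    (h : PySem.Chars.startswith url.toList p.toList = true) :
    String.ofList ("postgresql://".toList ++ PySem.List.slice url.toList (some (p.toList.length : Int)) none) =
      normalize_db_url_py_alt url := by
  obtain ⟨rest, hrest⟩ := (PySem.Chars.startswith_iff _ _).mp h
  rw [PySem.List.slice_from_natCast, ← hrest, List.drop_left,
    alt_pos url scheme.toList rest hs hmem (by rw [← hrest, hsplit, List.append_assoc])]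

-- ===== VERDICT (by name: the statement is the Claim_ definition above) =====
theorem normalize_db_url_py_spec : Claim_equal_normalize_db_url_py := by
  unfold Claim_equal_normalize_db_url_py
  intro url _
  unfold Spec_normalize_db_url_py
  by_cases h0 : url.toList = []
  · unfold normalize_db_url_py normalize_db_url_py_alt
    rw [if_pos h0, if_pos h0]
  · unfold normalize_db_url_py
    rw [if_neg h0]
    cases h1 : PySem.Chars.startswith url.toList "postgresql+psycopg2://".toList with
    | true =>
      simp only [pvStripLoop, pvPrefixes, h1, if_true]
      exact pos_branch url _ "postgresql+psycopg2" (by decide) (by decide) (by decide) h1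
    | false =>
    cases h2 : PySem.Chars.startswith url.toList "postgresql+psycopg://".toList with
    | true =>
      simp only [pvStripLoop, pvPrefixes, h1, h2, if_true, Bool.false_eq_true, if_false]
      exact pos_branch url _ "postgresql+psycopg" (by decide) (by decide) (by decide) h2
    | false =>
    cases h3 : PySem.Chars.startswith url.toList "postgresql+psycopg3://".toList with
    | true =>
      simp only [pvStripLoop, pvPrefixes, h1, h2, h3, if_true, Bool.false_eq_true, if_false]
      exact pos_branch url _ "postgresql+psycopg3" (by decide) (by decide) (by decide) h3
    | false =>
    cases h4 : PySem.Chars.startswith url.toList "postgres+psycopg2://".toList with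
    | true =>
      simp only [pvStripLoop, pvPrefixes, h1, h2, h3, h4, if_true, Bool.false_eq_true, if_false]
      exact pos_branch url _ "postgres+psycopg2" (by decide) (by decide) (by decide) h4
    | false =>
    cases h5 : PySem.Chars.startswith url.toList "postgres+psycopg://".toList with
    | true =>
      simp only [pvStripLoop, pvPrefixes, h1, h2, h3, h4, h5, if_true, Bool.false_eq_true, if_false]
      exact pos_branch url _ "postgres+psycopg" (by decide) (by decide) (by decide) h5
    | false =>
    cases h6 : PySem.Chars.startswith url.toList "postgres+psycopg3://".toList with
    | true =>
      simp only [pvStripLoop, pvPrefixes, h1, h2, h3, h4, h5, h6, if_true, Bool.false_eq_true, if_false]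
      exact pos_branch url _ "postgres+psycopg3" (by decide) (by decide) (by decide) h6
    | false =>
      simp only [pvStripLoop, pvPrefixes, h1, h2, h3, h4, h5, h6, Bool.false_eq_true, if_false]
      refine (alt_neg url ?_).symm
      intro s hs
      simp only [pvDialects, List.mem_cons, List.not_mem_nil, or_false] at hs
      rcases hs with rfl | rfl | rfl | rfl | rfl | rfl
      · rw [show "postgresql+psycopg2".toList ++ "://".toList = "postgresql+psycopg2://".toList from by decide]; exact h1
      · rw [show "postgresql+psycopg".toList ++ "://".toList = "postgresql+psycopg://".toList from by decide]; exact h2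
      · rw [show "postgresql+psycopg3".toList ++ "://".toList = "postgresql+psycopg3://".toList from by decide]; exact h3
      · rw [show "postgres+psycopg2".toList ++ "://".toList = "postgres+psycopg2://".toList from by decide]; exact h4
      · rw [show "postgres+psycopg".toList ++ "://".toList = "postgres+psycopg://".toList from by decide]; exact h5
      · rw [show "postgres+psycopg3".toList ++ "://".toList = "postgres+psycopg3://".toList from by decide]; exact h6
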